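-- pv_equiv track=rewrite | github.com/Ncraig95/grievance-mvp | grievance-mvp/apps/api/grievance_api/web/officer_auth.py | normalize_scope_key
-- ===== SOURCE A (Python) =====
-- def normalize_scope_key(value: object) -> str:
--     text = str(value or "").strip().lower()
--     chars: list[str] = []
--     last_was_sep = False
--     for ch in text:
--         if ch.isalnum():
--             chars.append(ch)
--             last_was_sep = False
--         elif not last_was_sep:
--             chars.append("_")
--             last_was_sep = True
--     return "".join(chars).strip("_")
-- ===== SOURCE B (Python) =====
-- def normalize_scope_key(value: object) -> str:
--     text = str(value or "").strip().lower()
--     parts = []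
--     i = 0
--     n = len(text)
--     while i < n:
--         if text[i].isalnum():
--             j = i
--             while j < n and text[j].isalnum():
--                 j += 1
--             parts.append(text[i:j])
--             i = j
--         else:
--             i += 1
--     return "_".join(parts)
-- ===== Notes on version B (the rewrite author's own statement) =====
-- stated objective: alternative
-- what changed: Replaces A's per-character state-machine (last_was_sep flag, emitting collapsed separator characters, then stripping them at both ends) by extracting the maximal alphanumeric runs and joining them with single underscores, which makes the collapse/strip behaviour fall out of the join.
import Mathlib
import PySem

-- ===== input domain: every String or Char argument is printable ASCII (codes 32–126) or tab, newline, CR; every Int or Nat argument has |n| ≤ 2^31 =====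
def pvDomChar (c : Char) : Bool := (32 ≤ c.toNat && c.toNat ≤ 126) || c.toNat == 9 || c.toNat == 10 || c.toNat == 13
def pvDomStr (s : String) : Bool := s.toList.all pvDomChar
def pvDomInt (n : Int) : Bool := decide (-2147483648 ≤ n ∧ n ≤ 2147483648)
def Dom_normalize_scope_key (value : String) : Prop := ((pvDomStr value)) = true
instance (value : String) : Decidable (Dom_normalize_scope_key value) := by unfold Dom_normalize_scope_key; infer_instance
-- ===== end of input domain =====

-- B replaces A's per-character flag loop + final strip("_") by extracting maximal alnum runs and
-- joining them with single underscores (objective: alternative decomposition; same cost). Equal return value proved.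

-- ===== PORT A =====
-- the for loop over text with state (chars, last_was_sep); list append kept as append
-- the loop body of A's for loop (one step: ch against the state (chars, last_was_sep))
def pvStep (st : List Char × Bool) (ch : Char) : List Char × Bool :=
  if PySem.Chars.isalnum ch then (st.1 ++ [ch], false)
  else if !st.2 then (st.1 ++ ['_'], true)
  else st

def normalize_scope_key (value : String) : String :=
  -- str(value or "") on a str argument is the argument itself ("" stays "")
  let text := PySem.Str.lower (PySem.Str.strip value)
  let r := text.toList.foldl pvStep ([], false)
  PySem.Str.stripChars (String.ofList r.1) "_"

-- ===== PORT B =====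
-- the outer while loop of Source B: each alnum run text[i:j] becomes one part (inner while = takeWhile/dropWhile)
def pvParts (cs : List Char) : List (List Char) :=
  match cs with
  | [] => []
  | c :: rest =>
      if PySem.Chars.isalnum c then
        (c :: rest.takeWhile PySem.Chars.isalnum) :: pvParts (rest.dropWhile PySem.Chars.isalnum)
      else pvParts rest
termination_by cs.length
decreasing_by
  · exact Nat.lt_succ_of_le (List.length_dropWhile_le _ _)
  · exact Nat.lt_succ_self _

def normalize_scope_key_alt (value : String) : String :=
  let text := PySem.Str.lower (PySem.Str.strip value)
  PySem.Str.join "_" ((pvParts text.toList).map String.ofList)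

-- ===== PRECONDITION & SPEC =====
def Spec_normalize_scope_key (value : String) (out : String) : Prop := out = normalize_scope_key_alt value
instance (value : String) (out : String) : Decidable (Spec_normalize_scope_key value out) := by unfold Spec_normalize_scope_key; infer_instance

-- ===== CLAIM (what is proved, stated in full; the proofs are below) =====
def Claim_equal_normalize_scope_key : Prop := ∀ (value : String), Dom_normalize_scope_key value → Spec_normalize_scope_key value (normalize_scope_key value)

-- ===== LEMMAS AND PROOFS =====

-- A's loop as a structural recursion on the remaining text with the last_was_sep flag
def pvARec (b : Bool) (cs : List Char) : List Char :=
  match cs with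
  | [] => []
  | c :: rest =>
      if PySem.Chars.isalnum c then c :: pvARec false rest
      else if b then pvARec true rest
      else '_' :: pvARec true rest

-- the predicate stripChars strips by
def pvU (c : Char) : Bool := (['_'] : List Char).contains c

theorem pvU_alnum {c : Char} (h : PySem.Chars.isalnum c = true) : pvU c = false := by
  unfold pvU
  simp only [List.contains_cons, List.contains_nil, Bool.or_false]
  cases hq : (c == '_') with
  | false => rfl
  | true =>
      exfalso
      rw [beq_iff_eq] at hq
      subst hq
      exact absurd h (by decide)

theorem pvFoldl_eq_aRec (cs : List Char) (acc : List Char) (b : Bool) :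
    (cs.foldl pvStep (acc, b)).1 = acc ++ pvARec b cs := by
  induction cs generalizing acc b with
  | nil => simp [pvARec]
  | cons c rest ih =>
      rw [List.foldl_cons]
      by_cases hc : PySem.Chars.isalnum c = true
      · have hs : pvStep (acc, b) c = (acc ++ [c], false) := by simp [pvStep, hc]
        rw [hs, ih]
        simp [pvARec, hc]
      · cases b with
        | false =>
            have hs : pvStep (acc, false) c = (acc ++ ['_'], true) := by simp [pvStep, hc]
            rw [hs, ih]
            simp [pvARec, hc]
        | true =>
            have hs : pvStep (acc, true) c = (acc, true) := by simp [pvStep, hc]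
            rw [hs, ih]
            simp [pvARec, hc]

theorem pvDropU_aRec_true (cs : List Char) :
    List.dropWhile pvU (pvARec true cs) = pvARec true cs := by
  induction cs with
  | nil => simp [pvARec]
  | cons c rest ih =>
      by_cases hc : PySem.Chars.isalnum c = true
      · simp [pvARec, hc, List.dropWhile_cons, pvU_alnum hc]
      · simp [pvARec, hc, ih]

theorem pvDropU_aRec_false (cs : List Char) :
    List.dropWhile pvU (pvARec false cs) = pvARec true cs := by
  induction cs with
  | nil => simp [pvARec]
  | cons c rest ih =>
      by_cases hc : PySem.Chars.isalnum c = true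
      · simp [pvARec, hc, List.dropWhile_cons, pvU_alnum hc]
      · have : pvU '_' = true := by decide
        simp [pvARec, hc, List.dropWhile_cons, this, pvDropU_aRec_true rest]

-- right strip of the '_' characters
def pvRstrip (cs : List Char) : List Char := (List.dropWhile pvU cs.reverse).reverse

theorem pvDropWhile_append_false {p : Char → Bool} {c : Char} (xs : List Char)
    (hc : p c = false) : List.dropWhile p (xs ++ [c]) = List.dropWhile p xs ++ [c] := by
  induction xs with
  | nil => simp [List.dropWhile_cons, hc]
  | cons x xs ih =>
      by_cases hx : p x = true
      · simp [List.dropWhile_cons, hx, ih]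
      · simp [List.dropWhile_cons, hx]

theorem pvRstrip_cons_alnum {c : Char} (h : PySem.Chars.isalnum c = true) (t : List Char) :
    pvRstrip (c :: t) = c :: pvRstrip t := by
  unfold pvRstrip
  rw [List.reverse_cons, pvDropWhile_append_false _ (pvU_alnum h)]
  simp

theorem pvRstrip_cons_underscore (t : List Char) :
    pvRstrip ('_' :: t) = if pvRstrip t = [] then [] else '_' :: pvRstrip t := by
  unfold pvRstrip
  rw [List.reverse_cons]
  rcases hd : List.dropWhile pvU t.reverse with _ | ⟨y, ys⟩
  · have h1 : List.dropWhile pvU (t.reverse ++ ['_']) = [] := by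
      rw [List.dropWhile_append]
      simp [hd]
      decide
    simp [h1, hd]
  · have h1 : List.dropWhile pvU (t.reverse ++ ['_']) = (y :: ys) ++ ['_'] := by
      rw [List.dropWhile_append]
      simp [hd]
    simp [h1, hd]

theorem pvParts_ne_nil (cs : List Char) : ∀ a ∈ pvParts cs, a ≠ [] := by
  induction cs using pvParts.induct with
  | case1 => intro a ha; rw [pvParts] at ha; simp at ha
  | case2 c rest hc ih =>
      intro a ha
      rw [pvParts] at ha
      simp only [hc, if_true, List.mem_cons] at ha
      rcases ha with rfl | ha
      · simp
      · exact ih a ha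
  | case3 c rest hc ih =>
      intro a ha
      rw [pvParts] at ha
      simp only [hc, if_false] at ha
      exact ih a ha

theorem pvJoin_eq_nil_iff (cs : List Char) :
    List.intercalate ['_'] (pvParts cs) = [] ↔ pvParts cs = [] := by
  constructor
  · intro h
    rcases hp : pvParts cs with _ | ⟨a, l⟩
    · rfl
    · exfalso
      have ha : a ≠ [] := pvParts_ne_nil cs a (by rw [hp]; simp)
      rcases l with _ | ⟨b, l'⟩
      · rw [hp] at h; simp [List.intercalate] at h; exact ha h
      · rw [hp] at h
        have : List.intercalate ['_'] (a :: b :: l') = a ++ ['_'] ++ List.intercalate ['_'] (b :: l') := by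
          simp [List.intercalate, List.intersperse]
        rw [this] at h
        simp at h
  · intro h; rw [h]; simp [List.intercalate]

theorem pvIntercalate_cons (a : List Char) (l : List (List Char)) :
    List.intercalate ['_'] (a :: l) =
      a ++ (if l = [] then [] else '_' :: List.intercalate ['_'] l) := by
  rcases l with _ | ⟨b, l'⟩
  · simp [List.intercalate]
  · have : List.intercalate ['_'] (a :: b :: l') = a ++ ['_'] ++ List.intercalate ['_'] (b :: l') := by
      simp [List.intercalate, List.intersperse]
    simp [this]

-- the joint main lemma: rstrip of A's loop output equals B's joined runs
theorem pvMain : ∀ n (cs : List Char), cs.length ≤ n →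
    pvRstrip (pvARec true cs) = List.intercalate ['_'] (pvParts cs) ∧
    pvRstrip (pvARec false cs) =
      cs.takeWhile PySem.Chars.isalnum ++
        (if pvParts (cs.dropWhile PySem.Chars.isalnum) = [] then []
         else '_' :: List.intercalate ['_'] (pvParts (cs.dropWhile PySem.Chars.isalnum))) := by
  intro n
  induction n with
  | zero =>
      intro cs h
      have : cs = [] := List.eq_nil_of_length_eq_zero (Nat.le_zero.mp h)
      subst this
      constructor <;> simp [pvARec, pvParts, pvRstrip, List.intercalate]
  | succ n ih =>
      intro cs h
      rcases cs with _ | ⟨c, rest⟩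
      · constructor <;> simp [pvARec, pvParts, pvRstrip, List.intercalate]
      · have hr : rest.length ≤ n := Nat.le_of_succ_le_succ h
        by_cases hc : PySem.Chars.isalnum c = true
        · -- head alnum: both statements reduce via pvRstrip_cons_alnum and the S-form for rest
          have hS := (ih rest hr).2
          have hA : pvARec true (c :: rest) = c :: pvARec false rest := by simp [pvARec, hc]
          have hA' : pvARec false (c :: rest) = c :: pvARec false rest := by simp [pvARec, hc]
          have hP : pvParts (c :: rest) =
              (c :: rest.takeWhile PySem.Chars.isalnum) :: pvParts (rest.dropWhile PySem.Chars.isalnum) := by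
            rw [pvParts]; simp [hc]
          constructor
          · rw [hA, pvRstrip_cons_alnum hc, hS, hP, pvIntercalate_cons]
            by_cases hq : pvParts (rest.dropWhile PySem.Chars.isalnum) = [] <;> simp [hq]
          · rw [hA', pvRstrip_cons_alnum hc, hS]
            simp [List.takeWhile_cons, List.dropWhile_cons, hc]
        · -- head a separator
          have hT := (ih rest hr).1
          have hA : pvARec true (c :: rest) = pvARec true rest := by simp [pvARec, hc]
          have hA' : pvARec false (c :: rest) = '_' :: pvARec true rest := by simp [pvARec, hc]
          have hP : pvParts (c :: rest) = pvParts rest := by rw [pvParts]; simp [hc]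
          constructor
          · rw [hA, hT, hP]
          · rw [hA', pvRstrip_cons_underscore, hT]
            have hd : (c :: rest).dropWhile PySem.Chars.isalnum = c :: rest := by
              simp [List.dropWhile_cons, hc]
            have ht : (c :: rest).takeWhile PySem.Chars.isalnum = [] := by
              simp [List.takeWhile_cons, hc]
            rw [hd, ht, hP]
            by_cases hq : pvParts rest = []
            · simp [hq, (pvJoin_eq_nil_iff rest).mpr hq, List.intercalate]
            · have : List.intercalate ['_'] (pvParts rest) ≠ [] := by
                intro hnil; exact hq ((pvJoin_eq_nil_iff rest).mp hnil)
              simp [this, hq]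

-- ===== VERDICT (by name: the statement is the Claim_ definition above) =====
theorem normalize_scope_key_spec : Claim_equal_normalize_scope_key := by
  unfold Claim_equal_normalize_scope_key Spec_normalize_scope_key
  intro value _
  unfold normalize_scope_key normalize_scope_key_alt
  apply String.toList_inj.mp
  set tl := (PySem.Str.lower (PySem.Str.strip value)).toList with htl
  rw [PySem.Str.toList_stripChars, PySem.Str.toList_join]
  have hfold := pvFoldl_eq_aRec tl [] false
  simp only [List.nil_append] at hfold
  rw [String.toList_ofList, hfold]
  have hstrip : PySem.Chars.stripChars (pvARec false tl) "_".toList =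
      pvRstrip (pvARec true tl) := by
    show (List.dropWhile pvU (List.dropWhile pvU (pvARec false tl)).reverse).reverse = _
    rw [pvDropU_aRec_false]
    rfl
  rw [hstrip, (pvMain tl.length tl le_rfl).1]
  have hmap : (pvParts tl).map (fun p => (String.ofList p).toList) = pvParts tl := by
    simp
  show _ = PySem.Chars.join "_".toList (((pvParts tl).map String.ofList).map String.toList)
  rw [List.map_map]
  show _ = List.intercalate ['_'] ((pvParts tl).map (fun p => (String.ofList p).toList))
  rw [hmap]
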